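-- pv_equiv track=rewrite | github.com/Ratan24/interview-embedding-benchmark | embed_api.py | compute_truncation_stats
-- ===== SOURCE A (Python) =====
-- def estimate_tokens(text):
--     """Rough token count estimate: word count * 1.5.
--
--     Args:
--         text: Input string.
--
--     Returns:
--         Estimated token count as int.
--     """
--     return int(len(text.split()) * 1.5)
--
-- def compute_truncation_stats(all_texts, token_limit):
--     """Compute truncation statistics for a list of text groups.
--
--     Args:
--         all_texts: List of lists of strings (one inner list per candidate).
--         token_limit: Model's maximum token count.
--
--     Returns:
--         Dict with keys: total, truncated, max_tokens_seen, limit.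
--     """
--     total = 0
--     truncated = 0
--     max_tokens = 0
--
--     for candidate_texts in all_texts:
--         for text in candidate_texts:
--             total += 1
--             est = estimate_tokens(text)
--             max_tokens = max(max_tokens, est)
--             if est > token_limit:
--                 truncated += 1
--
--     return {
--         "total_texts": total,
--         "truncated": truncated,
--         "max_tokens_seen": max_tokens,
--         "limit": token_limit,
--     }
-- ===== SOURCE B (Python) =====
-- def estimate_tokens(text):
--     return int(len(text.split()) * 1.5)
--
-- def compute_truncation_stats(all_texts, token_limit):
--     # Sort all estimates descending; the head is the max and the truncated
--     # count is the length of the strictly-greater prefix (scan stops early).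
--     ests = sorted((estimate_tokens(t) for group in all_texts for t in group),
--                   reverse=True)
--     truncated = 0
--     while truncated < len(ests) and ests[truncated] > token_limit:
--         truncated += 1
--     return {
--         "total_texts": len(ests),
--         "truncated": truncated,
--         "max_tokens_seen": ests[0] if ests else 0,
--         "limit": token_limit,
--     }
-- ===== Notes on version B (the rewrite author's own statement) =====
-- stated objective: alternative
-- what changed: Instead of one fused loop with three running accumulators, B sorts all token estimates descending once and then reads max_tokens_seen as the head of the sorted list and truncated as the length of its strictly-greater prefix found by a scan that stops at the first element within the limit.
import Mathlib
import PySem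

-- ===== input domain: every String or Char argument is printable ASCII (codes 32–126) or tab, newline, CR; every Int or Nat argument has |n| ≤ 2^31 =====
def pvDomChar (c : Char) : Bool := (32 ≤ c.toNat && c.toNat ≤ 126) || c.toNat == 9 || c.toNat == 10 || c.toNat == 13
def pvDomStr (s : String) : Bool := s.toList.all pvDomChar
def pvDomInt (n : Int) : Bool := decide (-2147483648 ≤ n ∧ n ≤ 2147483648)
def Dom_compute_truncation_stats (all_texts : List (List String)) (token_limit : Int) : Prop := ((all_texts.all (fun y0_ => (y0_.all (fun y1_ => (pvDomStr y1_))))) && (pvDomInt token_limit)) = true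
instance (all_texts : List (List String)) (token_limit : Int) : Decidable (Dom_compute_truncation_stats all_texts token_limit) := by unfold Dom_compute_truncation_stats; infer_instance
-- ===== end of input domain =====

-- B replaces A's fused accumulator loop by a sort-then-scan algorithm: sort all estimates
-- descending, read the max as the head and the truncated count as the strictly-greater prefix
-- (objective: alternative algorithm; O(n log n) vs A's O(n)).

-- ===== PORT A =====
-- estimate_tokens: int(len(text.split()) * 1.5); exact for n = word count ≥ 0: int(n*1.5) = n + n//2
def estimate_tokens (text : String) : Int :=
  let n := (PySem.Str.split₀ text).length
  ((n + n / 2 : Nat) : Int)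

def compute_truncation_stats (all_texts : List (List String)) (token_limit : Int) : List (String × Int) :=
  let st : Int × Int × Int :=
    all_texts.foldl (fun st candidate_texts =>
      candidate_texts.foldl (fun (st : Int × Int × Int) text =>
        let total := st.1 + 1
        let est := estimate_tokens text
        let max_tokens := max st.2.2 est
        let truncated := if est > token_limit then st.2.1 + 1 else st.2.1
        (total, truncated, max_tokens)) st) (0, 0, 0)
  [("total_texts", st.1), ("truncated", st.2.1), ("max_tokens_seen", st.2.2), ("limit", token_limit)]

-- ===== PORT B =====
-- the while-loop: walk the (descending-sorted) list, counting while elements exceed the limit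
def scan_trunc (token_limit : Int) : List Int → Int
  | [] => 0
  | e :: rest => if e > token_limit then 1 + scan_trunc token_limit rest else 0

def compute_truncation_stats_alt (all_texts : List (List String)) (token_limit : Int) : List (String × Int) :=
  let ests := PySem.List.sorted (all_texts.flatMap (fun group => group.map estimate_tokens)) (fun x => x) true
  [("total_texts", (ests.length : Int)),
   ("truncated", scan_trunc token_limit ests),
   ("max_tokens_seen", match ests with | [] => 0 | e :: _ => e),
   ("limit", token_limit)]

-- ===== PRECONDITION & SPEC =====
def Spec_compute_truncation_stats (all_texts : List (List String)) (token_limit : Int) (out : List (String × Int)) : Prop := out = compute_truncation_stats_alt all_texts token_limit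
instance (all_texts : List (List String)) (token_limit : Int) (out : List (String × Int)) : Decidable (Spec_compute_truncation_stats all_texts token_limit out) := by unfold Spec_compute_truncation_stats; infer_instance

-- ===== CLAIM =====
def Claim_equal_compute_truncation_stats : Prop := ∀ (all_texts : List (List String)) (token_limit : Int), Dom_compute_truncation_stats all_texts token_limit → Spec_compute_truncation_stats all_texts token_limit (compute_truncation_stats all_texts token_limit)

-- ===== LEMMAS AND PROOFS =====

theorem est_nonneg (t : String) : 0 ≤ estimate_tokens t := by
  simp only [estimate_tokens]
  positivity

-- A's inner fold in closed form
theorem inner_fold_char (tl : Int) (cand : List String) (a b c : Int) :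
    cand.foldl (fun (st : Int × Int × Int) text =>
        let total := st.1 + 1
        let est := estimate_tokens text
        let max_tokens := max st.2.2 est
        let truncated := if est > tl then st.2.1 + 1 else st.2.1
        (total, truncated, max_tokens)) (a, b, c)
      = (a + cand.length,
         b + ((cand.map estimate_tokens).countP (fun e => tl < e) : Nat),
         (cand.map estimate_tokens).foldl max c) := by
  induction cand generalizing a b c with
  | nil => simp
  | cons x t ih =>
      simp only [List.foldl_cons, List.map_cons, List.countP_cons, ih, List.length_cons,
        Prod.mk.injEq]
      refine ⟨by push_cast; ring, ?_⟩
      by_cases h : tl < estimate_tokens x <;> simp [h] <;> push_cast <;> try ring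

theorem outer_fold_char (tl : Int) (ts : List (List String)) (a b c : Int) :
    ts.foldl (fun st candidate_texts =>
      candidate_texts.foldl (fun (st : Int × Int × Int) text =>
        let total := st.1 + 1
        let est := estimate_tokens text
        let max_tokens := max st.2.2 est
        let truncated := if est > tl then st.2.1 + 1 else st.2.1
        (total, truncated, max_tokens)) st) (a, b, c)
      = (a + ((ts.flatMap (fun c => c.map estimate_tokens)).length : Nat),
         b + ((ts.flatMap (fun c => c.map estimate_tokens)).countP (fun e => tl < e) : Nat),
         (ts.flatMap (fun c => c.map estimate_tokens)).foldl max c) := by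
  induction ts generalizing a b c with
  | nil => simp
  | cons x t ih =>
      simp only [List.foldl_cons, inner_fold_char, ih, List.flatMap_cons,
        List.length_append, List.countP_append, List.foldl_append, Prod.mk.injEq,
        List.length_map]
      exact ⟨by push_cast; ring, by push_cast; ring, trivial⟩

-- on a descending-sorted list the early-stopping scan counts exactly the elements > limit
theorem scan_trunc_eq_countP (tl : Int) (l : List Int)
    (h : l.Pairwise (fun a b => b ≤ a)) :
    scan_trunc tl l = (l.countP (fun e => tl < e) : Nat) := by
  induction l with
  | nil => simp [scan_trunc]
  | cons x t ih =>
      rcases List.pairwise_cons.mp h with ⟨hx, ht⟩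
      by_cases hgt : tl < x
      · simp only [scan_trunc, if_pos, List.countP_cons, ih ht, decide_eq_true_eq, hgt]
        push_cast; ring
      · have hz : t.countP (fun e => decide (tl < e)) = 0 := by
          rw [List.countP_eq_zero]
          intro y hy
          simp only [decide_eq_true_eq]
          exact fun hlt => hgt (lt_of_lt_of_le hlt (hx y hy))
        simp [scan_trunc, hgt, hz]

theorem foldl_max_le (l : List Int) (m a : Int) (ha : a ≤ m) (h : ∀ x ∈ l, x ≤ m) :
    l.foldl max a ≤ m := by
  induction l generalizing a with
  | nil => simpa using ha
  | cons x t ih =>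
      refine ih _ (max_le ha (h x (by simp))) (fun y hy => h y (by simp [hy]))

-- the head of the descending sort equals the fold-max with seed 0 (all elements ≥ 0)
theorem head_sorted_eq_foldl_max (l : List Int) (hnn : ∀ x ∈ l, 0 ≤ x) :
    (match PySem.List.sorted l (fun x => x) true with | [] => 0 | e :: _ => e)
      = l.foldl max 0 := by
  rcases hs : PySem.List.sorted l (fun x => x) true with _ | ⟨m, t⟩
  · have : l = [] := by
      have := PySem.List.sorted_perm l (fun x => x) true
      rw [hs] at this
      exact this.symm.eq_nil
    simp [this]
  · have hperm := PySem.List.sorted_perm l (fun x => x) true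
    rw [hs] at hperm
    have hm : m ∈ l := hperm.mem_iff.mp (by simp)
    have hub : ∀ y ∈ l, y ≤ m := PySem.List.key_head_sorted_rev_ge l (fun x => x) hs
    have h1 : l.foldl max 0 ≤ m := foldl_max_le l m 0 (hnn m hm) hub
    have h2 : m ≤ l.foldl max 0 := (PySem.List.le_foldl_max l 0).2 m hm
    show m = l.foldl max 0
    omega

-- ===== VERDICT =====
theorem compute_truncation_stats_spec : Claim_equal_compute_truncation_stats := by
  intro all_texts token_limit _
  show compute_truncation_stats all_texts token_limit = compute_truncation_stats_alt all_texts token_limit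
  unfold compute_truncation_stats compute_truncation_stats_alt
  simp only [outer_fold_char]
  set l := all_texts.flatMap (fun c => c.map estimate_tokens) with hl
  have hperm := PySem.List.sorted_perm l (fun x => x) true
  have hlen : (PySem.List.sorted l (fun x => x) true).length = l.length := hperm.length_eq
  have hcnt : (PySem.List.sorted l (fun x => x) true).countP (fun e => decide (token_limit < e))
      = l.countP (fun e => decide (token_limit < e)) := hperm.countP_eq _
  have hscan := scan_trunc_eq_countP token_limit (PySem.List.sorted l (fun x => x) true)
    (PySem.List.sorted_pairwise_rev l (fun x => x))
  have hmax := head_sorted_eq_foldl_max l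
    (by intro x hx
        simp only [hl, List.mem_flatMap, List.mem_map] at hx
        obtain ⟨c, _, s, _, rfl⟩ := hx
        exact est_nonneg s)
  simp [hscan, hcnt, hlen, hmax]
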